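-- pv_equiv track=rewrite | github.com/yokotak/pftp | Puzzle2/partysmart-exercise3.py | chooseTime
-- ===== SOURCE A (Python) =====
-- def chooseTime(times):
--
--     rcount = 0
--     maxcount = 0
--     time = 0
--
--     #Range through the times computing a running count of celebrities
--     for t in times:
--         if t[2] == 'start':
--             rcount = rcount + t[1]
--         elif t[2] == 'end':
--             rcount = rcount - t[1]
--         if rcount > maxcount:
--             maxcount = rcount
--             time = t[0]
--
--     return maxcount, time
-- ===== SOURCE B (Python) =====
-- def chooseTime(times):
--     # Two-pass decomposition: build the running-count table, then take its
--     # maximum and the first index achieving it.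
--     counts = []
--     c = 0
--     for t in times:
--         c += t[1] if t[2] == 'start' else -t[1] if t[2] == 'end' else 0
--         counts.append(c)
--     m = max(counts, default=0)
--     if m > 0:
--         return m, times[counts.index(m)][0]
--     return 0, 0
-- ===== Notes on version B (the rewrite author's own statement) =====
-- stated objective: alternative
-- what changed: A's single fused loop that tracks running count, max and argmax time together is replaced by a two-pass decomposition: build the running-count table, then take max(counts) and the first index achieving it (counts.index).
import Mathlib
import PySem

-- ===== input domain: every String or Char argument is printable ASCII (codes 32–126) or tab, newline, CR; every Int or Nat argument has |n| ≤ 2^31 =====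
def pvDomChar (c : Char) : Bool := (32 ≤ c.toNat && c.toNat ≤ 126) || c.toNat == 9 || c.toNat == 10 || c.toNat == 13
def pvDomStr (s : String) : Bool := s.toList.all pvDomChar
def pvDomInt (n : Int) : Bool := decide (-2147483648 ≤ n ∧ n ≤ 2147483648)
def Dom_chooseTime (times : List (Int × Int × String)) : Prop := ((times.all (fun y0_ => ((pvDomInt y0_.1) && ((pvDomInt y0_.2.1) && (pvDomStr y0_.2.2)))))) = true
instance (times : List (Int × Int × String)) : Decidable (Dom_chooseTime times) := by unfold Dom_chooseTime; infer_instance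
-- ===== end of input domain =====

-- B replaces A's single fused tracking loop by a two-pass decomposition
-- (build the running-count table, then max + first argmax); objective: alternative.

-- ===== PORT A =====
-- state is (rcount, maxcount, time), loop body transliterated branch for branch
def chooseTimeStepA (s : Int × Int × Int) (t : Int × Int × String) : Int × Int × Int :=
  let rcount := if t.2.2 == "start" then s.1 + t.2.1
                else if t.2.2 == "end" then s.1 - t.2.1
                else s.1
  if s.2.1 < rcount then (rcount, rcount, t.1) else (rcount, s.2.1, s.2.2)

def chooseTime (times : List (Int × Int × String)) : Int × Int :=
  let s := times.foldl chooseTimeStepA (0, 0, 0)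
  (s.2.1, s.2.2)

-- ===== PORT B =====
-- signed delta of one event (the conditional expression in Source B's loop)
def pvDelta (t : Int × Int × String) : Int :=
  if t.2.2 == "start" then t.2.1 else if t.2.2 == "end" then -t.2.1 else 0

-- Source B's first loop: the running-count table `counts`
def pvCounts (c : Int) : List (Int × Int × String) → List Int
  | [] => []
  | t :: ts => (c + pvDelta t) :: pvCounts (c + pvDelta t) ts

def chooseTime_alt (times : List (Int × Int × String)) : Int × Int :=
  let counts := pvCounts 0 times
  let m := PySem.List.maxD counts (fun y => y) 0   -- max(counts, default=0)
  if 0 < m then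
    match PySem.List.index? counts m with
    | some i =>
        match PySem.List.pyGet? times (i : Int) with
        | some t => (m, t.1)
        | none => (m, 0)   -- unreachable: index? gives i < counts.length = times.length
    | none => (0, 0)       -- unreachable: 0 < m forces m ∈ counts
  else (0, 0)

-- ===== PRECONDITION & SPEC =====
def Spec_chooseTime (times : List (Int × Int × String)) (out : Int × Int) : Prop := out = chooseTime_alt times
instance (times : List (Int × Int × String)) (out : Int × Int) : Decidable (Spec_chooseTime times out) := by unfold Spec_chooseTime; infer_instance

-- ===== CLAIM (what is proved, stated in full; the proofs are below) =====
def Claim_equal_chooseTime : Prop := ∀ (times : List (Int × Int × String)), Dom_chooseTime times → Spec_chooseTime times (chooseTime times)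

-- ===== LEMMAS AND PROOFS =====

-- running count after processing ts starting from c
def pvRun (c : Int) (ts : List (Int × Int × String)) : Int :=
  ts.foldl (fun a x => a + pvDelta x) c

theorem pvCounts_len (c : Int) (ts : List (Int × Int × String)) :
    (pvCounts c ts).length = ts.length := by
  induction ts generalizing c with
  | nil => rfl
  | cons t ts ih => simp [pvCounts, ih]

theorem pvCounts_append (c : Int) (ts : List (Int × Int × String)) (t : Int × Int × String) :
    pvCounts c (ts ++ [t]) = pvCounts c ts ++ [pvRun c ts + pvDelta t] := by
  induction ts generalizing c with
  | nil => simp [pvCounts, pvRun]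
  | cons u us ih => simp [pvCounts, ih, pvRun, List.foldl_cons]

theorem max?_snoc (xs : List Int) (v : Int) :
    PySem.List.max? (xs ++ [v]) (fun y => y) =
      some (match PySem.List.max? xs (fun y => y) with | none => v | some m => max m v) := by
  cases xs with
  | nil => simp [PySem.List.max?]
  | cons x t =>
      rw [List.cons_append, PySem.List.max?_id_cons, PySem.List.max?_id_cons,
        List.foldl_append]
      simp

theorem stepA_eq (r m tm : Int) (t : Int × Int × String) :
    chooseTimeStepA (r, m, tm) t =
      (r + pvDelta t,
       if m < r + pvDelta t then r + pvDelta t else m,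
       if m < r + pvDelta t then t.1 else tm) := by
  simp only [chooseTimeStepA, pvDelta]
  split_ifs <;> simp_all <;> omega

theorem pvRun_append (c : Int) (ts : List (Int × Int × String)) (t : Int × Int × String) :
    pvRun c (ts ++ [t]) = pvRun c ts + pvDelta t := by
  simp [pvRun, List.foldl_append]

-- B's recurrence when one event is appended: exactly A's update rule
theorem alt_snoc (ts : List (Int × Int × String)) (t : Int × Int × String) :
    chooseTime_alt (ts ++ [t]) =
      (if (chooseTime_alt ts).1 < pvRun 0 ts + pvDelta t
       then (pvRun 0 ts + pvDelta t, t.1) else chooseTime_alt ts) := by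
  set v := pvRun 0 ts + pvDelta t with hv
  have hC' : pvCounts 0 (ts ++ [t]) = pvCounts 0 ts ++ [v] := pvCounts_append 0 ts t
  cases hmo : PySem.List.max? (pvCounts 0 ts) (fun y => y) with
  | none =>
      have hnil : pvCounts 0 ts = [] := (PySem.List.max?_eq_none_iff _ _).mp hmo
      have htsnil : ts = [] := by
        have h := pvCounts_len 0 ts
        rw [hnil] at h
        exact List.eq_nil_of_length_eq_zero h.symm
      subst htsnil
      have hv' : v = 0 + pvDelta t := by rw [hv]; rfl
      by_cases hv0 : 0 < v <;>
        simp [chooseTime_alt, pvCounts, ← hv', PySem.List.maxD, PySem.List.max?,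
          PySem.List.pyGet?, PySem.List.pyIdx?, hv0]
  | some m0 =>
      have hm0mem : m0 ∈ pvCounts 0 ts := PySem.List.max?_mem hmo
      have hle : ∀ y ∈ pvCounts 0 ts, y ≤ m0 := fun y hy => PySem.List.max?_isMax hmo y hy
      by_cases h0 : 0 < m0
      · -- B's value on ts: (m0, (ts[i]).1) at the first index i of m0
        obtain ⟨i, hidx⟩ : ∃ i, PySem.List.index? (pvCounts 0 ts) m0 = some i := by
          have h := (PySem.List.index?_isSome_iff _ _).mpr hm0mem
          exact Option.isSome_iff_exists.mp h
        have hilt : i < ts.length := by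
          rcases (PySem.List.index?_eq_some_iff _ _ _).mp hidx with ⟨pre, suf, hx, hlen, -⟩
          have h := pvCounts_len 0 ts
          rw [hx] at h
          simp at h
          omega
        have hget : PySem.List.pyGet? ts ((i : Nat) : Int) = some (ts[i]'hilt) := by
          rw [PySem.List.pyGet?_natCast]
          exact List.getElem?_eq_getElem hilt
        have halt : chooseTime_alt ts = (m0, (ts[i]'hilt).1) := by
          unfold chooseTime_alt
          simp only [PySem.List.maxD, hmo, Option.getD_some, if_pos h0, hidx, hget]
        rw [halt]
        by_cases hup : m0 < v
        · -- new element is a strict record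
          have hvpos : 0 < v := by omega
          have hnotmem : v ∉ pvCounts 0 ts := fun h => absurd (hle v h) (by omega)
          have hgt : PySem.List.pyGet? (ts ++ [t]) ((ts.length : Nat) : Int) = some t := by
            rw [PySem.List.pyGet?_natCast]
            simp
          unfold chooseTime_alt
          rw [hC']
          simp only [PySem.List.maxD]
          rw [max?_snoc, hmo]
          simp only [Option.getD_some, max_eq_right (le_of_lt hup), if_pos hvpos,
            PySem.List.index?_append_singleton_self _ v hnotmem, pvCounts_len, hgt]
          simp [hup]
        · -- old max survives: first occurrence unchanged
          have hget' : PySem.List.pyGet? (ts ++ [t]) ((i : Nat) : Int) = some (ts[i]'hilt) := by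
            rw [PySem.List.pyGet?_natCast, List.getElem?_append_left hilt]
            exact List.getElem?_eq_getElem hilt
          unfold chooseTime_alt
          rw [hC']
          simp only [PySem.List.maxD]
          rw [max?_snoc, hmo]
          simp only [Option.getD_some, max_eq_left (by omega : v ≤ m0), if_pos h0,
            PySem.List.index?_append_of_mem _ hm0mem, hidx, hget']
          simp [hup]
      · -- old max not positive: B on ts is (0, 0)
        have halt : chooseTime_alt ts = (0, 0) := by
          unfold chooseTime_alt
          simp only [PySem.List.maxD, hmo, Option.getD_some, if_neg h0]
        rw [halt]
        by_cases hv0 : 0 < v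
        · have hnotmem : v ∉ pvCounts 0 ts := fun h => absurd (hle v h) (by omega)
          have hgt : PySem.List.pyGet? (ts ++ [t]) ((ts.length : Nat) : Int) = some t := by
            rw [PySem.List.pyGet?_natCast]
            simp
          unfold chooseTime_alt
          rw [hC']
          simp only [PySem.List.maxD]
          rw [max?_snoc, hmo]
          simp only [Option.getD_some, max_eq_right (by omega : m0 ≤ v), if_pos hv0,
            PySem.List.index?_append_singleton_self _ v hnotmem, pvCounts_len, hgt]
        · have hmle : ¬ 0 < max m0 v := by omega
          unfold chooseTime_alt
          rw [hC']
          simp only [PySem.List.maxD]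
          rw [max?_snoc, hmo]
          simp only [Option.getD_some, if_neg hmle]
          simp [hv0]

-- the single fused loop of A computes exactly B's (runningCount, max, argmaxTime)
theorem pvInv (ts : List (Int × Int × String)) :
    ts.foldl chooseTimeStepA (0, 0, 0) =
      (pvRun 0 ts, (chooseTime_alt ts).1, (chooseTime_alt ts).2) := by
  induction ts using List.reverseRecOn with
  | nil => rfl
  | append_singleton ts t ih =>
      rw [List.foldl_append, List.foldl_cons, List.foldl_nil, ih, stepA_eq, pvRun_append,
        alt_snoc]
      by_cases h : (chooseTime_alt ts).1 < pvRun 0 ts + pvDelta t <;> simp [h]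

-- ===== VERDICT (by name: the statement is the Claim_ definition above) =====
theorem chooseTime_spec : Claim_equal_chooseTime := by
  intro times _
  unfold Spec_chooseTime chooseTime
  rw [pvInv]
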